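-- pv_equiv track=rewrite | github.com/romano-w/car-scraping | scrape_carscom.py | looks_like_bot_check
-- ===== SOURCE A (Python) =====
-- from typing import Dict, List, Optional, Tuple
--
-- def looks_like_bot_check(html: Optional[str]) -> bool:
--     if not html:
--         return False
--     text = html.lower()
--     signals = [
--         "are you a human",
--         "verify you are human",
--         "checking your browser",
--         "please enable javascript",
--         "captcha",
--         "access denied",
--         "request blocked",
--         "attention required",
--         "cf-chl-",
--         "just a moment",
--     ]
--     return any(s in text for s in signals)
-- ===== SOURCE B (Python) =====
-- _SIGNALS = (
--     "are you a human",
--     "verify you are human",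
--     "checking your browser",
--     "please enable javascript",
--     "captcha",
--     "access denied",
--     "request blocked",
--     "attention required",
--     "cf-chl-",
--     "just a moment",
-- )
--
--
-- def looks_like_bot_check(html):
--     if not html:
--         return False
--     text = html.lower()
--     for i in range(len(text)):
--         for s in _SIGNALS:
--             if text.startswith(s, i):
--                 return True
--     return False
-- ===== Notes on version B (the rewrite author's own statement) =====
-- stated objective: alternative
-- what changed: Replaces ten independent full substring scans ('s in text' for each signal) with a single left-to-right pass over the text that at each position checks whether any signal starts there, returning early at the first hit.
import Mathlib
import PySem

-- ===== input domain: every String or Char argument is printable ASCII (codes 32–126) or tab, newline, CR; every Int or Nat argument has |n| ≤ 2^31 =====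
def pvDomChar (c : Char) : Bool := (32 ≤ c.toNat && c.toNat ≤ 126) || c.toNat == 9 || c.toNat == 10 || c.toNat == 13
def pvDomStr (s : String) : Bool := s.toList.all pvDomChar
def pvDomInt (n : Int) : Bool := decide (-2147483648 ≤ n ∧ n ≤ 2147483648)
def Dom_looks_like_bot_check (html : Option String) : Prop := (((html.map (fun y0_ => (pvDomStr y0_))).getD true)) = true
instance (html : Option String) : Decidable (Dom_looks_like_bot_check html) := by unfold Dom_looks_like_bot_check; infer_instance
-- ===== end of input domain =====

-- B replaces A's ten independent 's in text' scans by one left-to-right pass over the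
-- text that at each position checks whether any signal starts there (alternative
-- decomposition, early exit at the first hit; same exact result).

-- ===== PORT A =====
def looks_like_bot_check (html : Option String) : Bool :=
  match html with
  | none => false
  | some h =>
    if h = "" then false   -- 'if not html' is true for None and for the empty string
    else
      let text := PySem.Str.lower h
      let signals : List String :=
        ["are you a human", "verify you are human", "checking your browser",
         "please enable javascript", "captcha", "access denied", "request blocked",
         "attention required", "cf-chl-", "just a moment"]
      signals.any (fun s => PySem.Str.isIn s text)

-- ===== PORT B =====
def botSignals : List String :=
  ["are you a human", "verify you are human", "checking your browser",
   "please enable javascript", "captcha", "access denied", "request blocked",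
   "attention required", "cf-chl-", "just a moment"]

-- B's 'for i in range(len(text))' loop over positions, transcribed as structural
-- recursion over the successive suffixes of the text; 'text.startswith(s, i)' at
-- position i is exactly PySem.Chars.startswith on the suffix (i is always in range here).
def botScan (sigs : List String) : List Char → Bool
  | [] => false
  | c :: rest =>
      if sigs.any (fun s => PySem.Chars.startswith (c :: rest) s.toList) then true
      else botScan sigs rest

def looks_like_bot_check_alt (html : Option String) : Bool :=
  match html with
  | none => false
  | some h =>
    if h = "" then false
    else botScan botSignals (PySem.Str.lower h).toList

-- ===== PRECONDITION & SPEC =====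
def Spec_looks_like_bot_check (html : Option String) (out : Bool) : Prop := out = looks_like_bot_check_alt html
instance (html : Option String) (out : Bool) : Decidable (Spec_looks_like_bot_check html out) := by unfold Spec_looks_like_bot_check; infer_instance

-- ===== CLAIM (what is proved, stated in full; the proofs are below) =====
def Claim_equal_looks_like_bot_check : Prop := ∀ (html : Option String), Dom_looks_like_bot_check html → Spec_looks_like_bot_check html (looks_like_bot_check html)

-- ===== LEMMAS AND PROOFS =====

-- a nonempty pattern is never contained in the empty text
lemma isIn_nil_of_ne (sub : List Char) (h : sub ≠ []) : PySem.Chars.isIn sub [] = false := by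
  rw [Bool.eq_false_iff]
  intro hc
  obtain ⟨j, hj⟩ := (PySem.Chars.exists_prefix_drop_iff_isIn sub []).mpr hc
  simp [List.drop_nil, List.prefix_nil] at hj
  exact h hj

-- 'sub in c :: rest' = (sub starts at position 0) || (sub in rest)
lemma isIn_cons (sub : List Char) (c : Char) (rest : List Char) :
    PySem.Chars.isIn sub (c :: rest) =
      (PySem.Chars.startswith (c :: rest) sub || PySem.Chars.isIn sub rest) := by
  rw [Bool.eq_iff_iff]
  simp only [Bool.or_eq_true, PySem.Chars.startswith_iff, ← PySem.Chars.exists_prefix_drop_iff_isIn]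
  constructor
  · rintro ⟨j, hj⟩
    cases j with
    | zero => exact Or.inl hj
    | succ j' => exact Or.inr ⟨j', by simpa using hj⟩
  · rintro (h | ⟨j, hj⟩)
    · exact ⟨0, h⟩
    · exact ⟨j + 1, by simpa using hj⟩

-- B's position scan computes A's any-signal-contained test (signals all nonempty)
lemma botScan_eq_any_isIn (sigs : List String) (hne : ∀ s ∈ sigs, s.toList ≠ []) (l : List Char) :
    botScan sigs l = sigs.any (fun s => PySem.Chars.isIn s.toList l) := by
  induction l with
  | nil =>
    rw [botScan]
    symm
    simp only [List.any_eq_false]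
    intro s hs
    simp [isIn_nil_of_ne s.toList (hne s hs)]
  | cons c rest ih =>
    rw [botScan, Bool.if_true_left, ih, Bool.eq_iff_iff]
    simp only [Bool.or_eq_true, List.any_eq_true, isIn_cons, decide_eq_true_eq]
    constructor
    · rintro (⟨x, hx, h⟩ | ⟨x, hx, h⟩)
      · exact ⟨x, hx, Or.inl h⟩
      · exact ⟨x, hx, Or.inr h⟩
    · rintro ⟨x, hx, h | h⟩
      · exact Or.inl ⟨x, hx, h⟩
      · exact Or.inr ⟨x, hx, h⟩

-- ===== VERDICT (by name: the statement is the Claim_ definition above) =====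
theorem looks_like_bot_check_spec : Claim_equal_looks_like_bot_check := by
  intro html _
  unfold Spec_looks_like_bot_check
  match html with
  | none => rfl
  | some h =>
    simp only [looks_like_bot_check, looks_like_bot_check_alt]
    split_ifs with hh
    · rfl
    · rw [botScan_eq_any_isIn botSignals (by decide)]
      simp [botSignals, PySem.Str.isIn_eq]
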